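-- pv_equiv track=rewrite | github.com/Antonio-III/Python | OC/Problems/Math/Verify_Expression/01_prealgebra.py | __rewrite_eq
-- ===== SOURCE A (Python) =====
-- def __rewrite_eq(exp: str) -> str:
--     """Replaces an equation symbol with double equal signs. Does not replace the equal symbol if it's part of an inequality.
--
--     Args:
--         exp: The mathematical expression.
--
--     Returns:
--         A new expression where every equality is replaced with a double-equal sign.
--     """
--     eq_count = exp.count("=")
--
--     if not eq_count:
--         return exp
--
--     new = ""
--
--     # TODO: Add a step to verify if equality/inequality symbols are valid.
--
--     i = 0
--
--     for _ in range(eq_count):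
--
--         eq_i = exp.find("=", i)
--
--         new += exp[i: eq_i]
--
--         # For the script to work for equations and inequalities, we only add an extra equal symbol if we are looking at a single equal sign.
--         new += "==" if (exp[eq_i-1] != "<") and (exp[eq_i-1] != ">") else "="
--
--         i = eq_i+1
--
--     new += exp[i: len(exp)]
--     return new
-- ===== SOURCE B (Python) =====
-- def __rewrite_eq(exp: str) -> str:
--     """Single uniform per-character pass: copy every character, and double each '='
--     unless the preceding character (exp[i-1], with Python's wraparound at i == 0,
--     matching the original) is '<' or '>'."""
--     parts = []
--     for i, c in enumerate(exp):
--         if c == "=" and exp[i - 1] not in "<>":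
--             parts.append("==")
--         else:
--             parts.append(c)
--     return "".join(parts)
-- ===== Notes on version B (the rewrite author's own statement) =====
-- stated objective: simpler
-- what changed: Replaces A's find-next-'='/slice-chunk loop (count, str.find with a moving start index, slice concatenation) with one uniform per-character classification pass that emits '==' or the character itself and joins at the end.
import Mathlib
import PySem

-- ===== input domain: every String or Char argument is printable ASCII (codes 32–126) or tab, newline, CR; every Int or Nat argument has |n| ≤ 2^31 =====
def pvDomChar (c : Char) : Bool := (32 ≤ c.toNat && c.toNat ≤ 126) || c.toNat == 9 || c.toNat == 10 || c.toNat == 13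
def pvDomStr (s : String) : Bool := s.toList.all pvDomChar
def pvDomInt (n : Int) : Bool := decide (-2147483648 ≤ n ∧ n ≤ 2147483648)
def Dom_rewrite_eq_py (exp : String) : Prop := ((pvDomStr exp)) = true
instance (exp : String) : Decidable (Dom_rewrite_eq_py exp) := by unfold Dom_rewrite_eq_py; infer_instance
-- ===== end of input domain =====

-- B replaces A's find/slice chunk loop by a uniform per-character pass (objective: simpler).

-- ===== PORT A =====
-- body of A's `for _ in range(eq_count)` loop: find the next '=', copy the chunk before it,
-- emit "==" or "=" depending on the preceding character, advance i past the '='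
def rewrite_eq_step (l : List Char) (st : Int × List Char) (_ : Nat) : Int × List Char :=
  let eq_i := PySem.Chars.findFrom l ['='] st.1
  let new := st.2 ++ PySem.Chars.slice l (some st.1) (some eq_i)
  let new := new ++ (if PySem.Chars.pyGet? l (eq_i - 1) ≠ some '<' ∧ PySem.Chars.pyGet? l (eq_i - 1) ≠ some '>'
                     then ['=', '='] else ['='])
  (eq_i + 1, new)

def rewrite_eq_py (exp : String) : String :=
  let l := exp.toList
  let eq_count := PySem.Chars.count l ['=']
  if eq_count = 0 then exp
  else
    let st := (List.range eq_count).foldl (rewrite_eq_step l) ((0 : Int), ([] : List Char))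
    String.ofList (st.2 ++ PySem.Chars.slice l (some st.1) (some (PySem.Chars.len l)))

-- ===== PORT B =====
def rewrite_eq_py_alt (exp : String) : String :=
  let l := exp.toList
  let parts := (PySem.List.enumerate l).map (fun ic =>
    if ic.2 = '=' ∧ PySem.Chars.pyGet? l (ic.1 - 1) ≠ some '<' ∧ PySem.Chars.pyGet? l (ic.1 - 1) ≠ some '>'
    then ['=', '='] else [ic.2])
  String.ofList (PySem.Chars.join [] parts)

-- ===== PRECONDITION & SPEC =====
def Spec_rewrite_eq_py (exp : String) (out : String) : Prop := out = rewrite_eq_py_alt exp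
instance (exp : String) (out : String) : Decidable (Spec_rewrite_eq_py exp out) := by unfold Spec_rewrite_eq_py; infer_instance

-- ===== CLAIM (what is proved, stated in full; the proofs are below) =====
def Claim_equal_rewrite_eq_py : Prop := ∀ (exp : String), Dom_rewrite_eq_py exp → Spec_rewrite_eq_py exp (rewrite_eq_py exp)

-- ===== LEMMAS AND PROOFS =====

-- the per-position classification both programs apply at an '='
def pvG (l : List Char) (i : Int) (c : Char) : List Char :=
  if c = '=' ∧ PySem.Chars.pyGet? l (i - 1) ≠ some '<' ∧ PySem.Chars.pyGet? l (i - 1) ≠ some '>'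
  then ['=', '='] else [c]

-- B's output restricted to the suffix of l starting at absolute position k
def pvProc (l : List Char) (k : Nat) : List Char :=
  ((PySem.List.enumerate (l.drop k) (k : Int)).map (fun ic => pvG l ic.1 ic.2)).flatten

theorem pv_join_nil_eq_flatten (xs : List (List Char)) :
    PySem.Chars.join [] xs = xs.flatten := by
  induction xs with
  | nil => simp [PySem.Chars.join_nil]
  | cons p rest ih =>
    cases rest with
    | nil => simp [PySem.Chars.join_singleton]
    | cons q r => simp only [PySem.Chars.join_cons_cons, List.flatten_cons] at *; simp [ih]

theorem pv_proc_no_eq (l : List Char) (s : List Char) (a : Int) (h : '=' ∉ s) :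
    ((PySem.List.enumerate s a).map (fun ic => pvG l ic.1 ic.2)).flatten = s := by
  induction s generalizing a with
  | nil => simp [PySem.List.enumerate_nil]
  | cons c t ih =>
    simp only [PySem.List.enumerate_cons, List.map_cons, List.flatten_cons]
    have hc : c ≠ '=' := by intro hc; exact h (by simp [hc])
    rw [ih (a+1) (by intro hm; exact h (List.mem_cons_of_mem _ hm))]
    simp [pvG, hc]

theorem pv_count_go_singleton (fuel : Nat) (s : List Char) (acc : Nat) (h : s.length ≤ fuel) :
    PySem.Chars.count.go ['='] fuel s acc = acc + s.count '=' := by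
  induction fuel generalizing s acc with
  | zero =>
    have : s = [] := by cases s <;> simp_all
    subst this; simp [PySem.Chars.count.go]
  | succ f ih =>
    cases s with
    | nil => simp [PySem.Chars.count.go]
    | cons c t =>
      simp only [PySem.Chars.count.go]
      by_cases hc : c = '='
      · subst hc
        have hp : List.isPrefixOf ['='] ('=' :: t) = true := by simp [List.isPrefixOf]
        rw [if_pos hp]
        simp only [List.length_cons] at h
        simp [ih t (acc + 1) (by omega)]
        omega
      · have hp : List.isPrefixOf ['='] (c :: t) = false := by
          simp [List.isPrefixOf]; exact fun hh => (hc hh.symm).elim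
        rw [if_neg (by simp [hp])]
        simp only [List.length_cons] at h
        simp [ih t acc (by omega), hc]

theorem pv_count_singleton (s : List Char) : PySem.Chars.count s ['='] = s.count '=' := by
  simp only [PySem.Chars.count, List.isEmpty_cons, if_false, Bool.false_eq_true]
  simpa using pv_count_go_singleton s.length s 0 le_rfl

theorem pv_find_char (s : List Char) (h : '=' ∈ s) :
    ∃ j : Nat, PySem.Chars.find s ['='] = (j : Int) ∧ j < s.length ∧
      s[j]? = some '=' ∧ ∀ i < j, s[i]? ≠ some '=' := by
  have hinf : ['='] <:+: s := by
    obtain ⟨t1, t2, rfl⟩ := List.append_of_mem h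
    exact ⟨t1, t2, by simp⟩
  have hnn : 0 ≤ PySem.Chars.find s ['='] := (PySem.Chars.find_nonneg_iff s ['=']).mpr hinf
  obtain ⟨hpre, hmin⟩ := PySem.Chars.find_spec hnn
  refine ⟨(PySem.Chars.find s ['=']).toNat, by omega, ?_, ?_, ?_⟩
  · by_contra hge
    push Not at hge
    rw [List.drop_eq_nil_of_le hge] at hpre
    simp at hpre
  · obtain ⟨r, hr⟩ := hpre
    have : (s.drop (PySem.Chars.find s ['=']).toNat).head? = some '=' := by rw [← hr]; simp
    rwa [List.head?_drop] at this
  · intro i hi hsome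
    apply hmin i hi
    have : (s.drop i).head? = some '=' := by rw [List.head?_drop]; exact hsome
    cases hd : s.drop i with
    | nil => simp [hd] at this
    | cons a t => rw [hd] at this; simp at this; exact ⟨t, by simp [this]⟩

theorem pv_foldl_step_len (l : List Char) (xs ys : List Nat) (h : xs.length = ys.length) :
    ∀ st, xs.foldl (rewrite_eq_step l) st = ys.foldl (rewrite_eq_step l) st := by
  induction xs generalizing ys with
  | nil =>
    cases ys with
    | nil => intro st; rfl
    | cons b t => simp at h
  | cons a t ih =>
    cases ys with
    | nil => simp at h
    | cons b u =>
      intro st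
      simp only [List.foldl_cons]
      have hst : rewrite_eq_step l st a = rewrite_eq_step l st b := rfl
      rw [hst]; exact ih u (by simpa using h) _

theorem pv_loopA (l : List Char) (n : Nat) :
    ∀ (k : Nat) (new : List Char), k ≤ l.length → (l.drop k).count '=' = n →
      (((List.range n).foldl (rewrite_eq_step l) ((k : Int), new)).2 ++
        PySem.Chars.slice l (some ((List.range n).foldl (rewrite_eq_step l) ((k : Int), new)).1)
          (some (PySem.Chars.len l))) = new ++ pvProc l k := by
  induction n with
  | zero =>
    intro k new hk hc
    simp only [List.range_zero, List.foldl_nil]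
    have hnomem : '=' ∉ l.drop k := by
      intro hm; simp [List.count_eq_zero] at hc; exact hc hm
    have hslice : PySem.Chars.slice l (some (k : Int)) (some (PySem.Chars.len l)) = l.drop k := by
      rw [PySem.Chars.len_eq, PySem.Chars.slice_eq_listSlice, PySem.List.slice_natCast]
      exact List.take_of_length_le (by simp)
    rw [hslice, pvProc, pv_proc_no_eq l _ _ hnomem]
  | succ n ih =>
    intro k new hk hc
    have hmem : '=' ∈ l.drop k := by
      by_contra hm
      rw [List.count_eq_zero.mpr hm] at hc; omega
    obtain ⟨j, hfind, hjlt, hjget, hjmin⟩ := pv_find_char (l.drop k) hmem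
    have hjlen : j < l.length - k := by simpa using hjlt
    -- findFrom value
    have hff : PySem.Chars.findFrom l ['='] (k : Int) = ((k + j : Nat) : Int) := by
      rw [PySem.Chars.findFrom_natCast l ['='] k hk, hfind]
      have : ((j : Int)) ≠ -1 := by omega
      rw [if_neg this]; push_cast; ring
    -- split of the suffix
    have hget : l[k+j]? = some '=' := by
      rw [← List.getElem?_drop]; exact hjget
    have hklt : k + j < l.length := by omega
    have hsplit : l.drop k = (l.drop k).take j ++ '=' :: l.drop (k+j+1) := by
      conv_lhs => rw [← List.take_append_drop j (l.drop k)]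
      congr 1
      rw [List.drop_drop]
      rw [List.drop_eq_getElem_cons (by omega : k + j < l.length)]
      congr 1
      have := hget; rw [List.getElem?_eq_getElem (by omega)] at this
      exact Option.some.inj this
    have hs1 : '=' ∉ (l.drop k).take j := by
      intro hmem1
      obtain ⟨i, hi, hieq⟩ := List.mem_iff_getElem.mp hmem1
      have hij : i < j := by simpa using (lt_of_lt_of_le hi (by simp))
      apply hjmin i hij
      rw [List.getElem?_eq_getElem (by omega)]
      rw [List.getElem_take] at hieq
      simp [hieq]
    have hs1len : ((l.drop k).take j).length = j := by
      simp; omega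
    -- counts
    have hcount' : (l.drop (k+j+1)).count '=' = n := by
      have := hc
      rw [hsplit] at this
      rw [List.count_append, List.count_cons, List.count_eq_zero.mpr hs1] at this
      simp at this; omega
    -- slice of the chunk
    have hslice : PySem.Chars.slice l (some (k : Int)) (some ((k + j : Nat) : Int)) = (l.drop k).take j := by
      rw [PySem.Chars.slice_eq_listSlice, PySem.List.slice_natCast]
      congr 1; omega
    -- the first step of the loop
    set G := (if PySem.Chars.pyGet? l (((k + j : Nat) : Int) - 1) ≠ some '<' ∧
                 PySem.Chars.pyGet? l (((k + j : Nat) : Int) - 1) ≠ some '>'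
              then ['=', '='] else ['=']) with hG
    have hstep : rewrite_eq_step l ((k : Int), new) 0 =
        (((k + j + 1 : Nat) : Int), new ++ ((l.drop k).take j ++ G)) := by
      simp only [rewrite_eq_step, hff, hslice, hG]
      rw [Prod.mk.injEq]
      refine ⟨by push_cast; ring, by simp [List.append_assoc]⟩
    -- peel the first iteration
    have hpeel : (List.range (n+1)).foldl (rewrite_eq_step l) ((k : Int), new) =
        (List.range n).foldl (rewrite_eq_step l) (rewrite_eq_step l ((k : Int), new) 0) := by
      rw [pv_foldl_step_len l (List.range (n+1)) (0 :: List.range n) (by simp)]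
      simp [List.foldl_cons]
    rw [hpeel, hstep]
    rw [ih (k+j+1) (new ++ ((l.drop k).take j ++ G)) (by omega) hcount']
    -- now expand pvProc l k
    have hproc : pvProc l k = (l.drop k).take j ++ (G ++ pvProc l (k+j+1)) := by
      rw [pvProc]
      conv_lhs => rw [hsplit]
      rw [PySem.List.enumerate_append, List.map_append, List.flatten_append]
      rw [pv_proc_no_eq l _ _ hs1]
      rw [hs1len, PySem.List.enumerate_cons, List.map_cons, List.flatten_cons]
      congr 1
      congr 1
      · rw [hG]
        have hidx : ((k : Int) + (j : Int)) - 1 = ((k + j : Nat) : Int) - 1 := by push_cast; ring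
        simp only [pvG, hidx]
        simp
    rw [hproc]
    simp [List.append_assoc]

theorem pv_alt_eq (exp : String) :
    rewrite_eq_py_alt exp = String.ofList (pvProc exp.toList 0) := by
  simp only [rewrite_eq_py_alt, pv_join_nil_eq_flatten]
  rfl

-- ===== VERDICT (by name: the statement is the Claim_ definition above) =====
theorem rewrite_eq_py_spec : Claim_equal_rewrite_eq_py := by
  unfold Claim_equal_rewrite_eq_py
  intro exp _
  unfold Spec_rewrite_eq_py
  rw [pv_alt_eq]
  simp only [rewrite_eq_py, pv_count_singleton]
  by_cases h0 : exp.toList.count '=' = 0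
  · rw [if_pos h0]
    have hno : '=' ∉ exp.toList := List.count_eq_zero.mp h0
    have h1 : pvProc exp.toList 0 = exp.toList := by
      rw [pvProc, List.drop_zero]
      exact pv_proc_no_eq _ _ _ hno
    rw [h1]
    exact String.ofList_toList.symm
  · rw [if_neg h0]
    have := pv_loopA exp.toList (exp.toList.count '=') 0 [] (by omega)
      (by rw [List.drop_zero])
    simp only [Nat.cast_zero, List.nil_append] at this
    rw [this]
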